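-- pv_equiv track=rewrite | github.com/ZiruiSongBest/ComputerAngentWithVision | vision/core/vision_executor.py | text_regularization
-- ===== SOURCE A (Python) =====
-- def text_regularization(text):
--     result = []
--     i = 0
--     in_tag = False
--     tag_start = 0
--     s = text
--     while i < len(s):
--         if s[i] == "<" and not in_tag and (i == 0 or s[i-1] != "\\"):
--             in_tag = True
--             tag_start = i
--         elif s[i] == ">" and in_tag:
--             in_tag = False
--             result.append(s[tag_start+1:i])
--         elif not in_tag:
--             if s[i] == " ":
--                 result.append("space")
--             else:
--                 result.append(s[i])
--         i += 1
--
--     return result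
-- ===== SOURCE B (Python) =====
-- def text_regularization(text):
--     result = []
--     i = 0
--     n = len(text)
--     while i < n:
--         if text[i] == "<" and (i == 0 or text[i-1] != "\\"):
--             j = text.find(">", i + 1)
--             if j == -1:
--                 break
--             result.append(text[i+1:j])
--             i = j + 1
--         else:
--             result.append("space" if text[i] == " " else text[i])
--             i += 1
--     return result
-- ===== Notes on version B (the rewrite author's own statement) =====
-- stated objective: simpler
-- what changed: Replaced the per-character in_tag/tag_start state machine with a stateless find-and-skip loop: on an unescaped '<' it searches for the next '>' and jumps past the whole tag, breaking if none exists.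
import Mathlib
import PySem

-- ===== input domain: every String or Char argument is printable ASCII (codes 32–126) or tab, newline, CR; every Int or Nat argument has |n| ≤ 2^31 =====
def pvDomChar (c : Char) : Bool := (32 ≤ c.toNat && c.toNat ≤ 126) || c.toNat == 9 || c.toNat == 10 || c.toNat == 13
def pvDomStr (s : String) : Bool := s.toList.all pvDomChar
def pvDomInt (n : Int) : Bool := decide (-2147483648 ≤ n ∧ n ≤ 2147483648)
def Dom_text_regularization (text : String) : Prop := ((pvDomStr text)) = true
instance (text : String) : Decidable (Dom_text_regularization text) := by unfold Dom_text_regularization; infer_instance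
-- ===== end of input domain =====

-- B replaces A's per-character in_tag/tag_start state machine by a stateless find-and-skip loop (simpler decomposition; same return value everywhere).

-- used by the ports' decreasing_by: a found index is inside the list
theorem pvFindIdxLt (l : List Char) (k : Nat) (h : l.findIdx? (· = '>') = some k) :
    k < l.length := by
  have := List.findIdx?_eq_some_iff_findIdx_eq.mp h
  omega

-- ===== PORT A =====
-- literal port of A's while loop: state (i, in_tag, tag_start, result); s[tag_start+1:i] is (drop (tag_start+1)).take (i - (tag_start+1)), exact since 0 ≤ tag_start+1 ≤ i < len
def pvALoop (s : List Char) (i : Nat) (inTag : Bool) (tagStart : Nat) (result : List String) : List String :=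
  if h : i < s.length then
    if s[i] == '<' && !inTag && (decide (i = 0) || !(s.getD (i-1) ' ' == '\\')) then
      pvALoop s (i+1) true i result
    else if s[i] == '>' && inTag then
      pvALoop s (i+1) false tagStart (result ++ [String.ofList ((s.drop (tagStart+1)).take (i - (tagStart+1)))])
    else if !inTag then
      if s[i] == ' ' then pvALoop s (i+1) inTag tagStart (result ++ ["space"])
      else pvALoop s (i+1) inTag tagStart (result ++ [String.ofList [s[i]]])
    else pvALoop s (i+1) inTag tagStart result
  else result
termination_by s.length - i

def text_regularization (text : String) : List String :=
  pvALoop text.toList 0 false 0 []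

-- ===== PORT B =====
-- literal port of B: str.find('>', i+1) is findIdx? (· = '>') on drop (i+1) (none = -1 = break); text[i+1:j] is the matching take
def pvBLoop (s : List Char) (i : Nat) (result : List String) : List String :=
  if h : i < s.length then
    if s[i] == '<' && (decide (i = 0) || !(s.getD (i-1) ' ' == '\\')) then
      match hf : (s.drop (i+1)).findIdx? (· = '>') with
      | none => result
      | some k =>
          pvBLoop s (i+1+k+1) (result ++ [String.ofList ((s.drop (i+1)).take k)])
    else
      pvBLoop s (i+1) (result ++ [if s[i] == ' ' then "space" else String.ofList [s[i]]])
  else result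
termination_by s.length - i
decreasing_by
  · have := pvFindIdxLt _ _ hf
    simp only [List.length_drop] at this; omega
  · omega

def text_regularization_alt (text : String) : List String :=
  pvBLoop text.toList 0 []

-- ===== PRECONDITION & SPEC =====
def Spec_text_regularization (text : String) (out : List String) : Prop := out = text_regularization_alt text
instance (text : String) (out : List String) : Decidable (Spec_text_regularization text out) := by unfold Spec_text_regularization; infer_instance

-- ===== CLAIM (what is proved, stated in full; the proofs are below) =====
def Claim_equal_text_regularization : Prop := ∀ (text : String), Dom_text_regularization text → Spec_text_regularization text (text_regularization text)

-- ===== LEMMAS AND PROOFS =====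

-- While in_tag is set with tag opener at t, A just scans for the next '>': characterise that scan by findIdx?.
theorem pvALoop_inTag (s : List Char) (i t : Nat) (res : List String) (ht : t + 1 ≤ i) :
    pvALoop s i true t res =
      match (s.drop i).findIdx? (· = '>') with
      | none => res
      | some k => pvALoop s (i+k+1) false t (res ++ [String.ofList ((s.drop (t+1)).take (i + k - (t+1)))]) := by
  by_cases h : i < s.length
  · have hdrop : s.drop i = s[i] :: s.drop (i+1) := List.drop_eq_getElem_cons h
    rw [pvALoop]
    simp only [h, dif_pos]
    by_cases hc : s[i] = '>'
    · rw [hdrop, List.findIdx?_cons]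
      simp [hc]
    · rw [if_neg (by simp), if_neg (by simp [hc]), if_neg (by simp)]
      rw [pvALoop_inTag s (i+1) t res (by omega)]
      rw [hdrop, List.findIdx?_cons, if_neg (by simp [hc])]
      cases hfind : (s.drop (i+1)).findIdx? (· = '>') with
      | none => simp
      | some k =>
          simp only [Option.map_some]
          have h1 : i + 1 + k = i + (k + 1) := by omega
          rw [h1]
  · have hd : s.drop i = [] := List.drop_eq_nil_of_le (by omega)
    rw [pvALoop, hd]
    simp [h]
termination_by s.length - i

theorem pvALoop_eq_pvBLoop (s : List Char) (i t : Nat) (res : List String) :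
    pvALoop s i false t res = pvBLoop s i res := by
  by_cases h : i < s.length
  · rw [pvALoop, pvBLoop]
    simp only [h, dif_pos]
    by_cases hlt : (s[i] == '<' && (decide (i = 0) || !(s.getD (i-1) ' ' == '\\'))) = true
    · rw [if_pos (by simp only [Bool.not_false, Bool.and_true]; simpa using hlt), if_pos hlt]
      rw [pvALoop_inTag s (i+1) i res (by omega)]
      cases hfind : (s.drop (i+1)).findIdx? (· = '>') with
      | none => rfl
      | some k =>
          simp only
          have h2 : i + 1 + k - (i + 1) = k := by omega
          rw [h2, pvALoop_eq_pvBLoop s (i+1+k+1) i]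
    · rw [if_neg (by simp only [Bool.not_false, Bool.and_true]; simpa using hlt), if_neg hlt]
      rw [if_neg (by simp), if_pos (by simp)]
      by_cases hsp : (s[i] == ' ') = true
      · rw [if_pos hsp, pvALoop_eq_pvBLoop s (i+1) t, if_pos hsp]
      · rw [if_neg hsp, pvALoop_eq_pvBLoop s (i+1) t, if_neg hsp]
  · rw [pvALoop, pvBLoop]; simp [h]
termination_by s.length - i
decreasing_by
  · have := pvFindIdxLt _ _ hfind
    simp only [List.length_drop] at this; omega
  · omega
  · omega

-- ===== VERDICT (by name: the statement is the Claim_ definition above) =====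
theorem text_regularization_spec : Claim_equal_text_regularization := by
  intro text _
  unfold Spec_text_regularization text_regularization text_regularization_alt
  exact pvALoop_eq_pvBLoop _ 0 0 []
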